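-- pv_equiv track=rewrite | github.com/microsoft/DLWorkspace | src/StorageManager/utils.py | keep_ancestor_paths
-- ===== SOURCE A (Python) =====
-- def ancestor_exists(path, ancestors):
--     for ancestor in ancestors:
--         if path.startswith(ancestor):
--             return True
--     return False
--
-- def remove_descendents(path, ancestors):
--     new_ancestors = set()
--     for ancestor in ancestors:
--         if ancestor.startswith(path):
--             continue
--         new_ancestors.add(ancestor)
--     new_ancestors.add(path)
--     return new_ancestors
--
-- def keep_ancestor_paths(paths):
--     ancestors = set()
--     for path in paths:
--         if ancestor_exists(path, ancestors):
--             continue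
--         ancestors = remove_descendents(path, ancestors)
--         ancestors.add(path)
--     return sorted(list(ancestors))
-- ===== SOURCE B (Python) =====
-- def keep_ancestor_paths(paths):
--     result = []
--     for path in sorted(paths):
--         if not result or not path.startswith(result[-1]):
--             result.append(path)
--     return result
-- ===== Notes on version B (the rewrite author's own statement) =====
-- stated objective: faster
-- what changed: Replaces the quadratic loop that checks every kept ancestor and rebuilds the set to drop descendants by a sort followed by a single linear scan that keeps a path exactly when it does not start with the previously kept path.
import Mathlib
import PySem

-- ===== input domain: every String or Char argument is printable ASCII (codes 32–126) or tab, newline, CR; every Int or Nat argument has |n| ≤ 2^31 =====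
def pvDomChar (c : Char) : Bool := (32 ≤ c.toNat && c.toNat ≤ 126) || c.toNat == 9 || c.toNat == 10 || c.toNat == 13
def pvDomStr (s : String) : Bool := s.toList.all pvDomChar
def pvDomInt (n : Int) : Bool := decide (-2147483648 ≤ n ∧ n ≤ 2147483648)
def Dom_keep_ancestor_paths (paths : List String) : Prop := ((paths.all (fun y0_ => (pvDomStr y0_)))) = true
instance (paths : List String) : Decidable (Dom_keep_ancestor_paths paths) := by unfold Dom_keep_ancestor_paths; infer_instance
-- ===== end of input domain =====

-- B replaces A's quadratic keep-minimal-paths loop (scan all kept ancestors, rebuild the set)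
-- by sort + one linear scan keeping each path that does not start with the previously kept one (objective: faster).


-- ===== PORT A =====
def ancestor_exists (path : String) (ancestors : PySem.Set String) : Bool :=
  ancestors.any (fun ancestor => PySem.Str.startswith path ancestor)

def remove_descendents (path : String) (ancestors : PySem.Set String) : PySem.Set String :=
  PySem.Set.add
    (ancestors.foldl
      (fun new_ancestors ancestor =>
        if PySem.Str.startswith ancestor path then new_ancestors
        else PySem.Set.add new_ancestors ancestor)
      PySem.Set.empty)
    path

-- loop body of A's main loop, as a named helper
def kap_step (ancestors : PySem.Set String) (path : String) : PySem.Set String :=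
  if ancestor_exists path ancestors then ancestors
  else PySem.Set.add (remove_descendents path ancestors) path

def keep_ancestor_paths (paths : List String) : List String :=
  PySem.List.sorted (paths.foldl kap_step PySem.Set.empty) (fun x => x)

-- ===== PORT B =====
-- loop body of B's scan: keep path unless it starts with the last kept path
def kap_alt_step (result : List String) (path : String) : List String :=
  match result.getLast? with
  | none => result ++ [path]
  | some last => if PySem.Str.startswith path last then result else result ++ [path]

def keep_ancestor_paths_alt (paths : List String) : List String :=
  (PySem.List.sorted paths (fun x => x)).foldl kap_alt_step []

-- ===== PRECONDITION & SPEC =====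
def Spec_keep_ancestor_paths (paths : List String) (out : List String) : Prop := out = keep_ancestor_paths_alt paths
instance (paths : List String) (out : List String) : Decidable (Spec_keep_ancestor_paths paths out) := by unfold Spec_keep_ancestor_paths; infer_instance

-- ===== CLAIM (what is proved, stated in full; the proofs are below) =====
def Claim_equal_keep_ancestor_paths : Prop := ∀ (paths : List String), Dom_keep_ancestor_paths paths → Spec_keep_ancestor_paths paths (keep_ancestor_paths paths)

-- ===== LEMMAS AND PROOFS =====

-- x is a minimal element of l under the prefix order: x ∈ l and its only prefix in l is x itself
def MinPath (l : List String) (x : String) : Prop :=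
  x ∈ l ∧ ∀ q ∈ l, q.toList <+: x.toList → q = x

lemma MinPath_congr {l l' : List String} (h : ∀ y, y ∈ l ↔ y ∈ l') (x : String) :
    MinPath l x ↔ MinPath l' x := by
  unfold MinPath
  rw [h x]
  exact ⟨fun ⟨h1, h2⟩ => ⟨h1, fun q hq => h2 q ((h q).mpr hq)⟩,
         fun ⟨h1, h2⟩ => ⟨h1, fun q hq => h2 q ((h q).mp hq)⟩⟩

lemma toList_inj {s t : String} (h : s.toList = t.toList) : s = t := String.toList_injective h

lemma prefix_antisymm {s t : String} (h1 : s.toList <+: t.toList) (h2 : t.toList <+: s.toList) : s = t := toList_inj (h1.eq_of_length_le h2.length_le)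

-- every element of l has a prefix that is minimal in l
lemma exists_min_prefix (l : List String) (q : String) (hq : q ∈ l) :
    ∃ r, MinPath l r ∧ r.toList <+: q.toList := by
  by_cases h : ∀ q' ∈ l, q'.toList <+: q.toList → q' = q
  · exact ⟨q, ⟨hq, h⟩, List.prefix_refl _⟩
  · push Not at h
    obtain ⟨q', hq', hpre, hne⟩ := h
    have hlen : q'.toList.length < q.toList.length := by
      rcases lt_or_eq_of_le hpre.length_le with h1 | h1
      · exact h1
      · exact absurd (toList_inj (List.IsPrefix.eq_of_length hpre h1)) hne
    obtain ⟨r, hr, hr2⟩ := exists_min_prefix l q' hq'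
    exact ⟨r, hr, hr2.trans hpre⟩
termination_by q.toList.length
decreasing_by exact hlen

-- lexicographic dichotomy: if q < L then q is a prefix of L or every extension of q is < L
lemma lex_prefix_or_forall {q L : List Char} (h : List.Lex (· < ·) q L) :
    q <+: L ∨ ∀ t, List.Lex (· < ·) (q ++ t) L := by
  induction h with
  | nil => exact Or.inl (List.nil_prefix)
  | @rel a b as bs hab => exact Or.inr (fun t => List.Lex.rel hab)
  | @cons a as bs h ih =>
    rcases ih with h1 | h2
    · exact Or.inl (List.prefix_cons_inj a |>.mpr h1)
    · exact Or.inr (fun t => List.Lex.cons (h2 t))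

-- a prefix is ≤ in string order
lemma prefix_le {q x : String} (h : q.toList <+: x.toList) : q ≤ x := by
  rcases h with ⟨t, ht⟩
  rcases eq_or_ne t [] with rfl | hne
  · simp at ht; exact le_of_eq (toList_inj ht.symm ▸ rfl)
  · apply le_of_lt
    rw [String.lt_iff_toList_lt, ← ht]
    show List.Lex (· < ·) q.toList (q.toList ++ t)
    induction q.toList with
    | nil => cases t with | nil => exact absurd rfl hne | cons c cs => exact List.Lex.nil
    | cons a as ih => exact List.Lex.cons ih

-- any string lying between a prefix of p and p itself also has that prefix
lemma prefix_between {q L p : String} (hqp : q.toList <+: p.toList) (hqL : q ≤ L) (hLp : L ≤ p) :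
    q.toList <+: L.toList := by
  rcases eq_or_lt_of_le hqL with rfl | hlt
  · exact List.prefix_refl _
  · rw [String.lt_iff_toList_lt] at hlt
    rcases lex_prefix_or_forall (hlt : List.Lex (· < ·) q.toList L.toList) with h1 | h2
    · exact h1
    · exfalso
      rcases hqp with ⟨t, ht⟩
      have : List.Lex (· < ·) p.toList L.toList := ht ▸ h2 t
      exact absurd (String.lt_iff_toList_lt.mpr this) (not_lt.mpr hLp)

-- ancestor_exists is an existence test
lemma ancestor_exists_iff (p : String) (S : List String) :
    ancestor_exists p S = true ↔ ∃ a ∈ S, a.toList <+: p.toList := by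
  unfold ancestor_exists
  simp [List.any_eq_true, PySem.Str.startswith_eq, PySem.Chars.startswith_iff]

-- characterization of remove_descendents's inner filter loop
lemma rd_fold_char (p : String) : ∀ (S acc : List String), acc.Nodup →
    (S.foldl (fun na a => if PySem.Str.startswith a p then na else PySem.Set.add na a) acc).Nodup ∧
    ∀ x, x ∈ S.foldl (fun na a => if PySem.Str.startswith a p then na else PySem.Set.add na a) acc ↔
      x ∈ acc ∨ (x ∈ S ∧ ¬ p.toList <+: x.toList) := by
  intro S
  induction S with
  | nil => intro acc h; exact ⟨h, by simp⟩
  | cons a as ih =>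
    intro acc hacc
    simp only [List.foldl_cons]
    by_cases hsw : PySem.Str.startswith a p = true
    · rw [if_pos hsw]
      have hpre : p.toList <+: a.toList := (PySem.Chars.startswith_iff _ _).mp (by rw [← PySem.Str.startswith_eq]; exact hsw)
      obtain ⟨h1, h2⟩ := ih acc hacc
      refine ⟨h1, fun x => (h2 x).trans ?_⟩
      constructor
      · rintro (h | ⟨h3, h4⟩)
        · exact Or.inl h
        · exact Or.inr ⟨by simp [h3], h4⟩
      · rintro (h | ⟨h3, h4⟩)
        · exact Or.inl h
        · rcases List.mem_cons.mp h3 with rfl | h5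
          · exact absurd hpre h4
          · exact Or.inr ⟨h5, h4⟩
    · rw [if_neg hsw]
      have hpre : ¬ p.toList <+: a.toList := by
        intro hc
        exact hsw (by rw [PySem.Str.startswith_eq]; exact (PySem.Chars.startswith_iff _ _).mpr hc)
      obtain ⟨h1, h2⟩ := ih (PySem.Set.add acc a) (PySem.Set.nodup_add acc a hacc)
      refine ⟨h1, fun x => (h2 x).trans ?_⟩
      rw [PySem.Set.mem_add]
      constructor
      · rintro ((h | rfl) | ⟨h3, h4⟩)
        · exact Or.inl h
        · exact Or.inr ⟨by simp, hpre⟩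
        · exact Or.inr ⟨by simp [h3], h4⟩
      · rintro (h | ⟨h3, h4⟩)
        · exact Or.inl (Or.inl h)
        · rcases List.mem_cons.mp h3 with rfl | h5
          · exact Or.inl (Or.inr rfl)
          · exact Or.inr ⟨h5, h4⟩

-- one step of A's loop preserves the minimality invariant
lemma kap_step_char (done : List String) (S : List String) (p : String)
    (hnd : S.Nodup) (hS : ∀ x, x ∈ S ↔ MinPath done x) :
    (kap_step S p).Nodup ∧ ∀ x, x ∈ kap_step S p ↔ MinPath (done ++ [p]) x := by
  unfold kap_step
  by_cases hex : ancestor_exists p S = true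
  · rw [if_pos hex]
    obtain ⟨a, haS, hapre⟩ := (ancestor_exists_iff p S).mp hex
    have haMin : MinPath done a := (hS a).mp haS
    refine ⟨hnd, fun x => ?_⟩
    constructor
    · intro hxS
      obtain ⟨hxd, hxmin⟩ := (hS x).mp hxS
      refine ⟨by simp [hxd], fun q hq hqpre => ?_⟩
      rcases List.mem_append.mp hq with hq1 | hq1
      · exact hxmin q hq1 hqpre
      · simp at hq1; subst hq1
        have hax : a = x := hxmin a haMin.1 (hapre.trans hqpre)
        subst hax
        exact prefix_antisymm hqpre hapre
    · rintro ⟨hmem, hmin⟩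
      have hxd : x ∈ done := by
        rcases List.mem_append.mp hmem with h1 | h1
        · exact h1
        · simp at h1; subst h1
          have : a = x := hmin a (by simp [haMin.1]) hapre
          exact this ▸ haMin.1
      exact (hS x).mpr ⟨hxd, fun q hq hqpre => hmin q (by simp [hq]) hqpre⟩
  · rw [if_neg hex]
    have hnex : ¬ ∃ a ∈ S, a.toList <+: p.toList := fun hc => hex ((ancestor_exists_iff p S).mpr hc)
    have hkey : ∀ q ∈ done, ¬ q.toList <+: p.toList := by
      intro q hq hc
      obtain ⟨r, hrmin, hrpre⟩ := exists_min_prefix done q hq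
      exact hnex ⟨r, (hS r).mpr hrmin, hrpre.trans hc⟩
    unfold remove_descendents
    have hemp : (PySem.Set.empty : List String).Nodup := by simp [PySem.Set.empty]
    obtain ⟨hF1, hF2⟩ := rd_fold_char p S PySem.Set.empty hemp
    constructor
    · exact PySem.Set.nodup_add _ p (PySem.Set.nodup_add _ p hF1)
    · intro x
      rw [PySem.Set.mem_add, PySem.Set.mem_add, hF2 x]
      simp only [PySem.Set.empty, List.not_mem_nil, false_or]
      constructor
      · rintro ((⟨hxS, hnp⟩ | rfl) | rfl)
        · obtain ⟨hxd, hxmin⟩ := (hS x).mp hxS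
          refine ⟨by simp [hxd], fun q hq hqpre => ?_⟩
          rcases List.mem_append.mp hq with hq1 | hq1
          · exact hxmin q hq1 hqpre
          · simp at hq1; subst hq1; exact absurd hqpre hnp
        all_goals
          refine ⟨by simp, fun q hq hqpre => ?_⟩
          rcases List.mem_append.mp hq with hq1 | hq1
          · exact absurd hqpre (hkey q hq1)
          · simpa using hq1
      · rintro ⟨hmem, hmin⟩
        rcases List.mem_append.mp hmem with h1 | h1
        · refine Or.inl (Or.inl ⟨(hS x).mpr ⟨h1, fun q hq hqpre => hmin q (by simp [hq]) hqpre⟩, ?_⟩)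
          intro hc
          have : p = x := hmin p (by simp) hc
          exact hkey x h1 (this ▸ hc)
        · simp at h1; exact Or.inr h1

-- A's whole loop
lemma kap_fold_char : ∀ (rest done S : List String), S.Nodup → (∀ x, x ∈ S ↔ MinPath done x) →
    (rest.foldl kap_step S).Nodup ∧ ∀ x, x ∈ rest.foldl kap_step S ↔ MinPath (done ++ rest) x := by
  intro rest
  induction rest with
  | nil => intro done S h1 h2; simpa using ⟨h1, h2⟩
  | cons p rest ih =>
    intro done S h1 h2
    obtain ⟨h3, h4⟩ := kap_step_char done S p h1 h2
    have := ih (done ++ [p]) (kap_step S p) h3 h4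
    simpa [List.append_assoc] using this

-- last element of a chain is maximal
lemma last_max : ∀ (res : List String) (L : String), res.Pairwise (· < ·) → res.getLast? = some L →
    ∀ x ∈ res, x ≤ L := by
  intro res
  induction res with
  | nil => intro L _ h; simp at h
  | cons a as ih =>
    intro L hp hL x hx
    cases as with
    | nil => simp at hL hx; subst hL; subst hx; rfl
    | cons b bs =>
      rw [List.getLast?_cons_cons] at hL
      rcases List.mem_cons.mp hx with rfl | hx2
      · have hab : x < b := (List.pairwise_cons.mp hp).1 b (by simp)
        have hbL : b ≤ L := ih L (List.pairwise_cons.mp hp).2 hL b (by simp)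
        exact le_of_lt (lt_of_lt_of_le hab hbL)
      · exact ih L (List.pairwise_cons.mp hp).2 hL x hx2

-- B's whole loop
lemma kap_alt_fold_char : ∀ (rest done res : List String),
    (done ++ rest).Pairwise (· ≤ ·) →
    res.Pairwise (· < ·) →
    (∀ x ∈ res, x ∈ done) →
    (∀ x, x ∈ res ↔ MinPath done x) →
    (rest.foldl kap_alt_step res).Pairwise (· < ·) ∧
    (∀ x ∈ rest.foldl kap_alt_step res, x ∈ done ++ rest) ∧
    ∀ x, x ∈ rest.foldl kap_alt_step res ↔ MinPath (done ++ rest) x := by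
  intro rest
  induction rest with
  | nil =>
    intro done res _ h2 h3 h4
    simp only [List.foldl_nil, List.append_nil]
    exact ⟨h2, h3, h4⟩
  | cons p rest ih =>
    intro done res hord h2 h3 h4
    have hord' : ((done ++ [p]) ++ rest).Pairwise (· ≤ ·) := by
      simpa [List.append_assoc] using hord
    have hdp : ∀ x ∈ done, x ≤ p := by
      intro x hx
      exact (List.pairwise_append.mp hord).2.2 x hx p (by simp)
    by_cases hexp : ∃ q ∈ done, q.toList <+: p.toList
    · -- p has a prefix among the processed paths: B skips p
      obtain ⟨q', hq', hq'pre⟩ := hexp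
      obtain ⟨r, hrmin, hrpre⟩ := exists_min_prefix done q' hq'
      have hrres : r ∈ res := (h4 r).mpr hrmin
      have hrp : r.toList <+: p.toList := hrpre.trans hq'pre
      obtain ⟨L, hL⟩ : ∃ L, res.getLast? = some L := by
        cases hres : res.getLast? with
        | none => rw [List.getLast?_eq_none_iff] at hres; subst hres; simp at hrres
        | some L => exact ⟨L, rfl⟩
      have hLres : L ∈ res := List.mem_of_getLast? hL
      have hLp : L ≤ p := hdp L (h3 L hLres)
      have hrL : r ≤ L := last_max res L h2 hL r hrres
      have hrLpre : r.toList <+: L.toList := prefix_between hrp hrL hLp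
      have hLr : r = L := ((h4 L).mp hLres).2 r hrmin.1 hrLpre
      have hstep : kap_alt_step res p = res := by
        unfold kap_alt_step
        rw [hL]
        show (if PySem.Str.startswith p L = true then res else res ++ [p]) = res
        rw [if_pos (by rw [PySem.Str.startswith_eq]; exact (PySem.Chars.startswith_iff _ _).mpr (hLr ▸ hrp))]
      have h4' : ∀ x, x ∈ res ↔ MinPath (done ++ [p]) x := by
        intro x
        constructor
        · intro hx
          obtain ⟨hxd, hxmin⟩ := (h4 x).mp hx
          refine ⟨by simp [hxd], fun q hq hqpre => ?_⟩
          rcases List.mem_append.mp hq with hq1 | hq1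
          · exact hxmin q hq1 hqpre
          · simp at hq1; subst hq1
            have hrx : r = x := hxmin r hrmin.1 (hrp.trans hqpre)
            subst hrx
            exact prefix_antisymm hqpre hrp
        · rintro ⟨hmem, hmin⟩
          have hxd : x ∈ done := by
            rcases List.mem_append.mp hmem with h1 | h1
            · exact h1
            · simp at h1; subst h1
              have : r = x := hmin r (by simp [hrmin.1]) hrp
              exact this ▸ hrmin.1
          exact (h4 x).mpr ⟨hxd, fun q hq hqpre => hmin q (by simp [hq]) hqpre⟩
      have := ih (done ++ [p]) res hord' h2 (fun x hx => by simp [h3 x hx]) h4'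
      simpa [List.append_assoc, hstep] using this
    · -- no prefix of p processed yet: B keeps p
      have hstep : kap_alt_step res p = res ++ [p] := by
        unfold kap_alt_step
        cases hres : res.getLast? with
        | none => rfl
        | some L =>
          have hLres : L ∈ res := List.mem_of_getLast? hres
          show (if PySem.Str.startswith p L = true then res else res ++ [p]) = res ++ [p]
          rw [if_neg]
          intro hc
          rw [PySem.Str.startswith_eq] at hc
          exact hexp ⟨L, h3 L hLres, (PySem.Chars.startswith_iff _ _).mp hc⟩
      have hpnd : p ∉ done := fun hc => hexp ⟨p, hc, List.prefix_refl _⟩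
      have hlt : ∀ x ∈ res, x < p := by
        intro x hx
        rcases lt_or_eq_of_le (hdp x (h3 x hx)) with h | h
        · exact h
        · exact absurd (h ▸ h3 x hx) hpnd
      have h2' : (res ++ [p]).Pairwise (· < ·) := by
        apply List.pairwise_append.mpr
        refine ⟨h2, List.pairwise_singleton _ _, ?_⟩
        intro a ha b hb
        simp at hb
        subst hb
        exact hlt a ha
      have h4' : ∀ x, x ∈ res ++ [p] ↔ MinPath (done ++ [p]) x := by
        intro x
        constructor
        · intro hx
          rcases List.mem_append.mp hx with hx1 | hx1
          · obtain ⟨hxd, hxmin⟩ := (h4 x).mp hx1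
            refine ⟨by simp [hxd], fun q hq hqpre => ?_⟩
            rcases List.mem_append.mp hq with hq1 | hq1
            · exact hxmin q hq1 hqpre
            · simp at hq1; subst hq1
              exact le_antisymm (prefix_le hqpre) (hdp x hxd)
          · simp at hx1; subst hx1
            refine ⟨by simp, fun q hq hqpre => ?_⟩
            rcases List.mem_append.mp hq with hq1 | hq1
            · exact absurd (hexp ⟨q, hq1, hqpre⟩) (fun h => h)
            · simpa using hq1
        · rintro ⟨hmem, hmin⟩
          rcases List.mem_append.mp hmem with h1 | h1
          · exact List.mem_append.mpr (Or.inl ((h4 x).mpr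
              ⟨h1, fun q hq hqpre => hmin q (by simp [hq]) hqpre⟩))
          · simp at h1; subst h1; simp
      have h3' : ∀ x ∈ res ++ [p], x ∈ done ++ [p] := by
        intro x hx
        rcases List.mem_append.mp hx with h1 | h1
        · simp [h3 x h1]
        · simp at h1; simp [h1]
      have := ih (done ++ [p]) (res ++ [p]) hord' h2' h3' h4'
      simpa [List.append_assoc, hstep] using this

-- ===== VERDICT (by name: the statement is the Claim_ definition above) =====
theorem keep_ancestor_paths_spec : Claim_equal_keep_ancestor_paths := by
  intro paths _
  unfold Spec_keep_ancestor_paths keep_ancestor_paths keep_ancestor_paths_alt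
  have hA := kap_fold_char paths [] PySem.Set.empty (by simp [PySem.Set.empty])
    (by intro x; simp [PySem.Set.empty, MinPath])
  obtain ⟨hndS, hSmem⟩ := hA
  have hSmem' : ∀ x, x ∈ paths.foldl kap_step PySem.Set.empty ↔ MinPath paths x := by
    intro x; simpa using hSmem x
  have hys_pair : (PySem.List.sorted paths (fun x => x)).Pairwise (· ≤ ·) :=
    PySem.List.sorted_pairwise paths (fun x => x)
  have hB := kap_alt_fold_char (PySem.List.sorted paths (fun x => x)) [] []
    (by simpa using hys_pair) (by simp) (by simp) (by intro x; simp [MinPath])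
  obtain ⟨hRpair, _, hRmem⟩ := hB
  simp only [List.nil_append] at hRmem
  have hRmem' : ∀ x, x ∈ (PySem.List.sorted paths (fun x => x)).foldl kap_alt_step [] ↔ MinPath paths x := by
    intro x
    rw [hRmem x]
    exact MinPath_congr (fun y => PySem.List.mem_sorted paths (fun x => x) false y) x
  have hRnd : ((PySem.List.sorted paths (fun x => x)).foldl kap_alt_step []).Nodup :=
    hRpair.imp (fun h => ne_of_lt h)
  have hperm : ((PySem.List.sorted paths (fun x => x)).foldl kap_alt_step []).Perm
      (paths.foldl kap_step PySem.Set.empty) :=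
    (List.perm_ext_iff_of_nodup hRnd hndS).mpr (fun x => (hRmem' x).trans (hSmem' x).symm)
  exact PySem.List.sorted_eq_of_perm_of_pairwise_lt _ _ (fun x => x) hperm hRpair
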